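-- pv_equiv track=rewrite | github.com/Moskize91/summary | summary/epub/writer.py | _generate_chapter_xhtml
-- ===== SOURCE A (Python) =====
-- def _generate_chapter_xhtml(chapter_title: str, paragraphs: list[str]) -> str:
--     """Generate XHTML content for a chapter.
--
--     Args:
--         chapter_title: Title of the chapter
--         paragraphs: List of paragraph texts
--
--     Returns:
--         XHTML string
--     """
--
--     # Escape HTML special characters
--     def escape_html(text: str) -> str:
--         return (
--             text.replace("&", "&amp;")
--             .replace("<", "&lt;")
--             .replace(">", "&gt;")
--             .replace('"', "&quot;")
--             .replace("'", "&#39;")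
--         )
--
--     # Build paragraphs HTML
--     paragraphs_html = "\n".join(f"    <p>{escape_html(p)}</p>" for p in paragraphs)
--
--     # Generate complete XHTML
--     xhtml = f"""<?xml version="1.0" encoding="utf-8"?>
-- <!DOCTYPE html>
-- <html xmlns="http://www.w3.org/1999/xhtml">
-- <head>
--     <title>{escape_html(chapter_title)}</title>
-- </head>
-- <body>
--     <h1>{escape_html(chapter_title)}</h1>
-- {paragraphs_html}
-- </body>
-- </html>"""
--
--     return xhtml
-- ===== SOURCE B (Python) =====
-- _ESC = {"&": "&amp;", "<": "&lt;", ">": "&gt;", '"': "&quot;", "'": "&#39;"}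
--
--
-- def _escape(text: str) -> str:
--     # single pass: map each character through the table
--     return "".join(_ESC.get(c, c) for c in text)
--
--
-- def _generate_chapter_xhtml(chapter_title: str, paragraphs: list[str]) -> str:
--     """Generate XHTML content for a chapter, assembled as a flat list of lines."""
--     title = _escape(chapter_title)
--     lines = [
--         '<?xml version="1.0" encoding="utf-8"?>',
--         "<!DOCTYPE html>",
--         '<html xmlns="http://www.w3.org/1999/xhtml">',
--         "<head>",
--         f"    <title>{title}</title>",
--         "</head>",
--         "<body>",
--         f"    <h1>{title}</h1>",
--     ]
--     for p in paragraphs: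
--         lines.append(f"    <p>{_escape(p)}</p>")
--     lines.append("</body>")
--     lines.append("</html>")
--     return "\n".join(lines)
-- ===== Notes on version B (the rewrite author's own statement) =====
-- stated objective: alternative
-- what changed: B assembles the document as a flat list of lines appended one by one and joined once with '\n' (no f-string template, no nested join over paragraphs), and escapes each string in a single per-character dict-lookup pass instead of five ordered .replace() passes.
-- intended difference: When paragraphs is empty, A's template inserts a stray blank line between <h1> and </body> (the empty joined block still occupies a line slot); B emits no blank line, which is the intended well-formed output. — e.g. on _generate_chapter_xhtml("t", []): A returns "<?xml version=\"1.0\" encoding=\"utf-8\"?>\n<!DOCTYPE html>\n<html xmlns=\"http://www.w3.org/1999/xhtml\">\n<head>\n <…, B returns "<?xml version=\"1.0\" encoding=\"utf-8\"?>\n<!DOCTYPE html>\n<html xmlns=\"http://www.w3.org/1999/xhtml\">\n<head>\n <…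
import Mathlib
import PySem

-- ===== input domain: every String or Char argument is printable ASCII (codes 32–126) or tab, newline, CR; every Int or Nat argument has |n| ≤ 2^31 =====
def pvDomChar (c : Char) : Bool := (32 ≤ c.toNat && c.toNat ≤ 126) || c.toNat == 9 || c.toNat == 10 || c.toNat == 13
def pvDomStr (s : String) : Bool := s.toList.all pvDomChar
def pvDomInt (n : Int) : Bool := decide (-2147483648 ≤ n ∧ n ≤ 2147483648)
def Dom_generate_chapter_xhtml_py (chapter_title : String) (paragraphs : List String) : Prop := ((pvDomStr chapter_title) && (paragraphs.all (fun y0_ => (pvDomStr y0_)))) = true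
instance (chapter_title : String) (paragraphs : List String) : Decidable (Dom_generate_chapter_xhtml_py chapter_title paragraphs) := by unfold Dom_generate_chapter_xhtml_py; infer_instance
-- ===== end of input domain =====

-- B builds the document as a flat list of lines with one '\n'.join and escapes in a single
-- per-character table pass; on empty paragraphs B omits A's stray blank line (objective: alternative).
set_option maxRecDepth 4000
set_option maxHeartbeats 1000000


-- ===== PORT A =====
-- literal XHTML template fragments of A's f-string
def pvTplHead : String := "<?xml version=\"1.0\" encoding=\"utf-8\"?>\n<!DOCTYPE html>\n<html xmlns=\"http://www.w3.org/1999/xhtml\">\n<head>\n    <title>"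
def pvTplMid1 : String := "</title>\n</head>\n<body>\n    <h1>"
def pvTplMid2 : String := "</h1>\n"
def pvTplTail : String := "\n</body>\n</html>"

-- A's escape_html: five chained .replace passes, in A's order
def pvEscapeA (text : String) : String :=
  PySem.Str.replace
    (PySem.Str.replace
      (PySem.Str.replace
        (PySem.Str.replace
          (PySem.Str.replace text "&" "&amp;")
          "<" "&lt;")
        ">" "&gt;")
      "\"" "&quot;")
    "'" "&#39;"

def generate_chapter_xhtml_py (chapter_title : String) (paragraphs : List String) : String :=
  let paragraphs_html := PySem.Str.join "\n"
    (paragraphs.map (fun p =>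
      String.ofList ("    <p>".toList ++ (pvEscapeA p).toList ++ "</p>".toList)))
  String.ofList (pvTplHead.toList ++ (pvEscapeA chapter_title).toList ++ pvTplMid1.toList
    ++ (pvEscapeA chapter_title).toList ++ pvTplMid2.toList
    ++ paragraphs_html.toList ++ pvTplTail.toList)

-- ===== PORT B =====
-- Source B's _ESC.get(c, c): the per-character table lookup
def pvEscChar (c : Char) : List Char :=
  if c = '&' then "&amp;".toList
  else if c = '<' then "&lt;".toList
  else if c = '>' then "&gt;".toList
  else if c = '"' then "&quot;".toList
  else if c = '\'' then "&#39;".toList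
  else [c]

-- Source B's _escape: ''.join of the mapped characters = one flatMap pass
def pvEscapeB (text : String) : String :=
  String.ofList (text.toList.flatMap pvEscChar)

def generate_chapter_xhtml_py_alt (chapter_title : String) (paragraphs : List String) : String :=
  let title := pvEscapeB chapter_title
  let lines : List String :=
    (["<?xml version=\"1.0\" encoding=\"utf-8\"?>",
      "<!DOCTYPE html>",
      "<html xmlns=\"http://www.w3.org/1999/xhtml\">",
      "<head>",
      String.ofList ("    <title>".toList ++ title.toList ++ "</title>".toList),
      "</head>",
      "<body>",
      String.ofList ("    <h1>".toList ++ title.toList ++ "</h1>".toList)]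
     ++ paragraphs.map (fun p =>
          String.ofList ("    <p>".toList ++ (pvEscapeB p).toList ++ "</p>".toList))
     ++ ["</body>", "</html>"])
  PySem.Str.join "\n" lines

-- ===== PRECONDITION & SPEC =====
-- When paragraphs is empty, A's template inserts a stray blank line between <h1> and </body>;
-- B emits no blank line, which is the intended well-formed output.
def D_generate_chapter_xhtml_py (chapter_title : String) (paragraphs : List String) : Prop :=
  paragraphs = []
instance (chapter_title : String) (paragraphs : List String) : Decidable (D_generate_chapter_xhtml_py chapter_title paragraphs) := by unfold D_generate_chapter_xhtml_py; infer_instance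

def Spec_generate_chapter_xhtml_py (chapter_title : String) (paragraphs : List String) (out : String) : Prop := ¬ D_generate_chapter_xhtml_py chapter_title paragraphs → out = generate_chapter_xhtml_py_alt chapter_title paragraphs
instance (chapter_title : String) (paragraphs : List String) (out : String) : Decidable (Spec_generate_chapter_xhtml_py chapter_title paragraphs out) := by unfold Spec_generate_chapter_xhtml_py; infer_instance

def pvDiffWitness_generate_chapter_xhtml_py : String × List String := ("t", [])
def pvDiffWitnessOut_generate_chapter_xhtml_py : String × String :=
  ("<?xml version=\"1.0\" encoding=\"utf-8\"?>\n<!DOCTYPE html>\n<html xmlns=\"http://www.w3.org/1999/xhtml\">\n<head>\n    <title>t</title>\n</head>\n<body>\n    <h1>t</h1>\n\n</body>\n</html>",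
   "<?xml version=\"1.0\" encoding=\"utf-8\"?>\n<!DOCTYPE html>\n<html xmlns=\"http://www.w3.org/1999/xhtml\">\n<head>\n    <title>t</title>\n</head>\n<body>\n    <h1>t</h1>\n</body>\n</html>")

-- ===== CLAIM (what is proved, stated in full; the proofs are below) =====
def Claim_unchanged_generate_chapter_xhtml_py : Prop := ∀ (chapter_title : String) (paragraphs : List String), Dom_generate_chapter_xhtml_py chapter_title paragraphs → Spec_generate_chapter_xhtml_py chapter_title paragraphs (generate_chapter_xhtml_py chapter_title paragraphs)
def Claim_changed_generate_chapter_xhtml_py : Prop := Dom_generate_chapter_xhtml_py (pvDiffWitness_generate_chapter_xhtml_py.1) (pvDiffWitness_generate_chapter_xhtml_py.2) ∧ D_generate_chapter_xhtml_py (pvDiffWitness_generate_chapter_xhtml_py.1) (pvDiffWitness_generate_chapter_xhtml_py.2) ∧ generate_chapter_xhtml_py (pvDiffWitness_generate_chapter_xhtml_py.1) (pvDiffWitness_generate_chapter_xhtml_py.2) = pvDiffWitnessOut_generate_chapter_xhtml_py.1 ∧ generate_chapter_xhtml_py_alt (pvDiffWitness_generate_chapter_xhtml_py.1) (pvDiffWitness_generate_chapter_xhtml_py.2)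 = pvDiffWitnessOut_generate_chapter_xhtml_py.2 ∧ pvDiffWitnessOut_generate_chapter_xhtml_py.1 ≠ pvDiffWitnessOut_generate_chapter_xhtml_py.2
def Claim_exact_generate_chapter_xhtml_py : Prop := ∀ (chapter_title : String) (paragraphs : List String), Dom_generate_chapter_xhtml_py chapter_title paragraphs → D_generate_chapter_xhtml_py chapter_title paragraphs → generate_chapter_xhtml_py chapter_title paragraphs ≠ generate_chapter_xhtml_py_alt chapter_title paragraphs

-- ===== LEMMAS AND PROOFS =====

theorem pv_flatMap_comp {α β γ : Type} (l : List α) (f : α → List β) (g : β → List γ) :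
    (l.flatMap f).flatMap g = l.flatMap (fun x => (f x).flatMap g) := by
  induction l with
  | nil => simp
  | cons x t ih => simp [List.flatMap_cons, ih]

def pvSub (a : Char) (r : List Char) (c : Char) : List Char := if c = a then r else [c]

theorem pv_go_single (a : Char) (r : List Char) :
    ∀ (l : List Char) (fuel : Nat) (acc : List Char), l.length ≤ fuel →
      PySem.Chars.replace.go [a] r fuel l acc = acc.reverse ++ l.flatMap (pvSub a r)
  | l, 0, acc, h => by
      have hl : l = [] := by cases l with
        | nil => rfl
        | cons c t => simp at h
      subst hl; simp [PySem.Chars.replace.go]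
  | [], fuel + 1, acc, h => by simp [PySem.Chars.replace.go]
  | c :: t, fuel + 1, acc, h => by
      have ht : t.length ≤ fuel := by simpa using h
      by_cases hc : c = a
      · have hpre : List.isPrefixOf [a] (c :: t) = true := by
          simp [List.isPrefixOf, hc]
        simp only [PySem.Chars.replace.go, hpre, if_true]
        rw [show List.drop (List.length [a]) (c :: t) = t from rfl]
        rw [pv_go_single a r t fuel (r.reverse ++ acc) ht]
        simp [pvSub, hc]
      · have hpre : List.isPrefixOf [a] (c :: t) = false := by
          simp [List.isPrefixOf]; exact fun h' => (hc h'.symm).elim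
        simp only [PySem.Chars.replace.go, hpre, Bool.false_eq_true, if_false]
        rw [pv_go_single a r t fuel (c :: acc) ht]
        simp [pvSub, hc]

theorem pv_replace_single (a : Char) (r : List Char) (s : List Char) :
    PySem.Chars.replace s [a] r = s.flatMap (pvSub a r) := by
  unfold PySem.Chars.replace
  simp [pv_go_single a r s s.length [] (le_refl _)]

theorem pv_escape_eq (s : String) : pvEscapeA s = pvEscapeB s := by
  unfold pvEscapeA pvEscapeB
  simp only [PySem.Str.replace, String.toList_ofList]
  rw [show ("&" : String).toList = ['&'] from rfl,
      show ("<" : String).toList = ['<'] from rfl,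
      show (">" : String).toList = ['>'] from rfl,
      show ("\"" : String).toList = ['"'] from rfl,
      show ("'" : String).toList = ['\''] from rfl]
  rw [pv_replace_single, pv_replace_single, pv_replace_single, pv_replace_single,
      pv_replace_single]
  rw [pv_flatMap_comp, pv_flatMap_comp, pv_flatMap_comp, pv_flatMap_comp]
  congr 1
  congr 1
  funext c
  by_cases h1 : c = '&' <;> by_cases h2 : c = '<' <;> by_cases h3 : c = '>' <;>
    by_cases h4 : c = '"' <;> by_cases h5 : c = '\'' <;>
    simp_all [pvSub, pvEscChar]

-- join over a nonempty head element with a nonempty tail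
theorem pv_join_cons (sep a : List Char) (l : List (List Char)) (h : l ≠ []) :
    PySem.Chars.join sep (a :: l) = a ++ sep ++ PySem.Chars.join sep l := by
  cases l with
  | nil => exact absurd rfl h
  | cons b t => simp [PySem.Chars.join_cons_cons, List.append_assoc]

theorem pv_join_append (sep : List Char) (xs ys : List (List Char)) (hx : xs ≠ []) (hy : ys ≠ []) :
    PySem.Chars.join sep (xs ++ ys)
      = PySem.Chars.join sep xs ++ sep ++ PySem.Chars.join sep ys := by
  induction xs with
  | nil => exact absurd rfl hx
  | cons a t ih =>
      cases t with
      | nil =>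
          simp [pv_join_cons sep a ys hy, PySem.Chars.join_singleton]
      | cons b u =>
          rw [List.cons_append, pv_join_cons sep a ((b :: u) ++ ys) (by simp),
              ih (by simp), pv_join_cons sep a (b :: u) (by simp)]
          simp [List.append_assoc]

-- closed chunk equalities between A's template fragments and B's lines
theorem pv_head_chunk : pvTplHead.toList
    = "<?xml version=\"1.0\" encoding=\"utf-8\"?>".toList ++ ['\n'] ++ "<!DOCTYPE html>".toList
      ++ ['\n'] ++ "<html xmlns=\"http://www.w3.org/1999/xhtml\">".toList ++ ['\n']
      ++ "<head>".toList ++ ['\n'] ++ "    <title>".toList := by decide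
theorem pv_mid1_chunk : pvTplMid1.toList
    = "</title>".toList ++ ['\n'] ++ "</head>".toList ++ ['\n'] ++ "<body>".toList
      ++ ['\n'] ++ "    <h1>".toList := by decide
theorem pv_mid2_chunk : pvTplMid2.toList = "</h1>".toList ++ ['\n'] := by decide
theorem pv_tail_chunk : pvTplTail.toList
    = ['\n'] ++ "</body>".toList ++ ['\n'] ++ "</html>".toList := by decide

-- the join of B's line list, for a nonempty block M of paragraph lines
theorem pv_join_lines (t : List Char) (M : List (List Char)) (hM : M ≠ []) :
    PySem.Chars.join ['\n']
      (["<?xml version=\"1.0\" encoding=\"utf-8\"?>".toList, "<!DOCTYPE html>".toList,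
        "<html xmlns=\"http://www.w3.org/1999/xhtml\">".toList, "<head>".toList,
        "    <title>".toList ++ t ++ "</title>".toList, "</head>".toList, "<body>".toList,
        "    <h1>".toList ++ t ++ "</h1>".toList] ++ M ++ ["</body>".toList, "</html>".toList])
    = pvTplHead.toList ++ t ++ pvTplMid1.toList ++ t ++ pvTplMid2.toList
      ++ PySem.Chars.join ['\n'] M ++ pvTplTail.toList := by
  have hMP : M ++ ["</body>".toList, "</html>".toList] ≠ [] := by
    cases M <;> simp
  rw [show (["<?xml version=\"1.0\" encoding=\"utf-8\"?>".toList, "<!DOCTYPE html>".toList,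
        "<html xmlns=\"http://www.w3.org/1999/xhtml\">".toList, "<head>".toList,
        "    <title>".toList ++ t ++ "</title>".toList, "</head>".toList, "<body>".toList,
        "    <h1>".toList ++ t ++ "</h1>".toList] ++ M ++ ["</body>".toList, "</html>".toList])
      = "<?xml version=\"1.0\" encoding=\"utf-8\"?>".toList :: "<!DOCTYPE html>".toList ::
        "<html xmlns=\"http://www.w3.org/1999/xhtml\">".toList :: "<head>".toList ::
        ("    <title>".toList ++ t ++ "</title>".toList) :: "</head>".toList :: "<body>".toList ::
        ("    <h1>".toList ++ t ++ "</h1>".toList) :: (M ++ ["</body>".toList, "</html>".toList])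
      from by simp]
  rw [pv_join_cons _ _ _ (by simp), pv_join_cons _ _ _ (by simp), pv_join_cons _ _ _ (by simp),
      pv_join_cons _ _ _ (by simp), pv_join_cons _ _ _ (by simp), pv_join_cons _ _ _ (by simp),
      pv_join_cons _ _ _ (by simp), pv_join_cons _ _ _ hMP,
      pv_join_append _ M _ hM (by simp), PySem.Chars.join_cons_cons, PySem.Chars.join_singleton]
  rw [pv_head_chunk, pv_mid1_chunk, pv_mid2_chunk, pv_tail_chunk]
  simp [List.append_assoc]

-- ===== VERDICT (by name: the statements are the Claim_ definitions above) =====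
theorem generate_chapter_xhtml_py_spec : Claim_unchanged_generate_chapter_xhtml_py := by
  intro chapter_title paragraphs _ hD
  show generate_chapter_xhtml_py chapter_title paragraphs
      = generate_chapter_xhtml_py_alt chapter_title paragraphs
  unfold generate_chapter_xhtml_py generate_chapter_xhtml_py_alt
  simp only [pv_escape_eq]
  apply String.toList_inj.mp
  rw [String.toList_ofList, PySem.Str.toList_join, PySem.Str.toList_join]
  simp only [List.map_append, List.map_map, List.map_cons, List.map_nil,
    Function.comp_def, String.toList_ofList]
  rw [show ("\n" : String).toList = ['\n'] from rfl]
  rw [pv_join_lines _ _ (by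
    intro h
    have := congrArg List.length h
    simp at this
    exact hD (by simpa [D_generate_chapter_xhtml_py, List.map_eq_nil_iff] using this))]

theorem generate_chapter_xhtml_py_changed : Claim_changed_generate_chapter_xhtml_py := by
  unfold Claim_changed_generate_chapter_xhtml_py; decide

theorem generate_chapter_xhtml_py_tight : Claim_exact_generate_chapter_xhtml_py := by
  intro chapter_title paragraphs _ hD heq
  have hps : paragraphs = [] := hD
  subst hps
  have h := congrArg String.toList heq
  rw [show generate_chapter_xhtml_py chapter_title [] = String.ofList (pvTplHead.toList
      ++ (pvEscapeB chapter_title).toList ++ pvTplMid1.toList ++ (pvEscapeB chapter_title).toList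
      ++ pvTplMid2.toList ++ pvTplTail.toList) from by
    simp [generate_chapter_xhtml_py, pv_escape_eq, PySem.Str.toList_join, PySem.Chars.join_nil]] at h
  simp only [generate_chapter_xhtml_py_alt] at h
  rw [PySem.Str.toList_join] at h
  simp only [List.map_append, List.map_cons, List.map_nil,
    String.toList_ofList] at h
  rw [show ("\n" : String).toList = ['\n'] from rfl] at h
  simp only [List.append_nil, List.cons_append, List.nil_append] at h
  rw [pv_join_cons _ _ _ (by simp), pv_join_cons _ _ _ (by simp), pv_join_cons _ _ _ (by simp),
      pv_join_cons _ _ _ (by simp), pv_join_cons _ _ _ (by simp), pv_join_cons _ _ _ (by simp),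
      pv_join_cons _ _ _ (by simp), pv_join_cons _ _ _ (by simp),
      PySem.Chars.join_cons_cons, PySem.Chars.join_singleton] at h
  have hlen := congrArg List.length h
  simp only [List.length_append] at hlen
  have c1 : pvTplHead.toList.length = 117 := by decide
  have c2 : pvTplMid1.toList.length = 32 := by decide
  have c3 : pvTplMid2.toList.length = 6 := by decide
  have c4 : pvTplTail.toList.length = 16 := by decide
  have d1 : "<?xml version=\"1.0\" encoding=\"utf-8\"?>".toList.length = 38 := by decide
  have d2 : "<!DOCTYPE html>".toList.length = 15 := by decide
  have d3 : "<html xmlns=\"http://www.w3.org/1999/xhtml\">".toList.length = 43 := by decide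
  have d4 : "<head>".toList.length = 6 := by decide
  have d5 : "    <title>".toList.length = 11 := by decide
  have d6 : "</title>".toList.length = 8 := by decide
  have d7 : "</head>".toList.length = 7 := by decide
  have d8 : "<body>".toList.length = 6 := by decide
  have d9 : "    <h1>".toList.length = 8 := by decide
  have d10 : "</h1>".toList.length = 5 := by decide
  have d11 : "</body>".toList.length = 7 := by decide
  have d12 : "</html>".toList.length = 7 := by decide
  have dn : (['\n'] : List Char).length = 1 := by decide
  rw [c1, c2, c3, c4, d1, d2, d3, d4, d5, d6, d7, d8, d9, d10, d11, d12, dn] at hlen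
  omega
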